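-- pv_equiv track=rewrite | github.com/mayukh42/py-1337 | gen/numbers.py | confusing_naive
-- ===== SOURCE A (Python) =====
-- MIRROR_DIGITS = {0: 0, 1: 1, 6: 9, 8: 8, 9: 6}
--
-- def mirrored(digit):
--     return MIRROR_DIGITS.get(digit, -1)
--
-- def digits(num):
--     ds = []
--     if not num:
--         ds.append(0)
--         return ds
--     while num >= 1:
--         r = num % 10
--         ds.append(r)
--         num = int(num/10)
--     return list(reversed(ds))
--
-- def number(digits):
--     ds = list(reversed(digits))
--     ten_power = 0
--     num = 0
--     for d in ds:
--         num += d * (10 ** ten_power)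
--         ten_power += 1
--     return num
--
-- def is_mirrored_all(digits):
--     for d in digits:
--         if mirrored(d) == -1:
--             # digit cannot be mirrored
--             return False
--     return True
--
-- def mirror_all(digits):
--     md = []
--     for d in digits:
--         if mirrored(d) >= 0: # redundant if used with is_mirrored_all first
--             md.append(mirrored(d))
--     return md
--
-- def confusing_naive(num):
--     # check all numbers if they can be rotated
--     res = {}
--     for n in range(num+1):
--         if n in res:
--             continue
--         ds = digits(n)
--         if is_mirrored_all(ds):
--             res[n] = True
--             ds_mrr = mirror_all(ds)
--             m = number(ds_mrr)
--             if m < num + 1: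
--                 # only add ones less than given N
--                 res[m] = True
--     return list(sorted(res.keys()))
-- ===== SOURCE B (Python) =====
-- def confusing_naive(num):
--     # Generate the mirrorable numbers directly, digit by digit, instead of
--     # scanning every integer up to num: BFS over digit length keeps each
--     # level (and hence the result) in increasing order, so no sort is needed.
--     res = [0] if num >= 0 else []
--     frontier = [d for d in (1, 6, 8, 9) if d <= num]
--     for _ in range(len(str(num))):
--         res += frontier
--         frontier = [10 * v + d for v in frontier for d in (0, 1, 6, 8, 9) if 10 * v + d <= num]
--     return res
-- ===== Notes on version B (the rewrite author's own statement) =====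
-- stated objective: faster
-- what changed: Instead of scanning every integer in [0, num] and testing/mirroring its digits with a dict, B generates exactly the numbers whose digits are all in {0,1,6,8,9} by breadth-first digit extension (each level appends one more digit), which visits only the k ~ num^0.7 answers and emits them already in increasing order, so no dict and no sort are needed.
import Mathlib
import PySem

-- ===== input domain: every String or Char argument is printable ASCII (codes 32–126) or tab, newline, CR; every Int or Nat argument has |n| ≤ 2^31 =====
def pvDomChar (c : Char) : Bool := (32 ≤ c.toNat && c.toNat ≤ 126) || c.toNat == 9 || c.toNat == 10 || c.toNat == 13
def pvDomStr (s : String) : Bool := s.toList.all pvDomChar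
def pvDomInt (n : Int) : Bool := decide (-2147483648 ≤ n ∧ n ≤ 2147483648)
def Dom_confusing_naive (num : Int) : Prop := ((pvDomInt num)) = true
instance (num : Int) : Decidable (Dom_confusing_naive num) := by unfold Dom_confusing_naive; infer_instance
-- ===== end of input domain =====

-- B replaces A's scan of every integer in [0, num] (digit-test + mirror via a dict, then sort)
-- by direct breadth-first generation of the numbers built only from digits {0,1,6,8,9},
-- emitted already in increasing order; objective: faster.

-- ===== PORT A =====
def MIRROR_DIGITS : PySem.Dict Int Int := PySem.Dict.ofList [(0,0),(1,1),(6,9),(8,8),(9,6)]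

def mirroredA (digit : Int) : Int := MIRROR_DIGITS.getD digit (-1)

-- the 'while num >= 1' loop of digits(); int(num/10) is exact truncating division on the Dom range
def digitsLoop (num : Int) (ds : List Int) : List Int :=
  if 1 ≤ num then digitsLoop (PySem.Int.truncdiv num 10) (ds ++ [PySem.Int.mod num 10]) else ds
termination_by num.toNat
decreasing_by
  simp only [PySem.Int.truncdiv]
  have h2 : num.tdiv 10 < num := by
    rw [Int.tdiv_eq_ediv_of_nonneg (by omega)]
    omega
  omega

def digitsA (num : Int) : List Int :=
  if num == 0 then [0] else (digitsLoop num []).reverse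

def numberA (ds : List Int) : Int :=
  (ds.reverse.foldl (fun (st : Int × Int) d => (st.1 + d * 10 ^ st.2.toNat, st.2 + 1)) (0, 0)).1

def is_mirrored_allA (ds : List Int) : Bool := ds.all (fun d => !(mirroredA d == -1))

def mirror_allA (ds : List Int) : List Int :=
  ds.foldl (fun md d => if mirroredA d ≥ 0 then md ++ [mirroredA d] else md) []

-- value of a little-endian digit list

def stepA (num : Int) (res : PySem.Dict Int Bool) (n : Int) : PySem.Dict Int Bool :=
  if res.contains n then res
  else
    let ds := digitsA n
    if is_mirrored_allA ds then
      let res1 := res.insert n true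
      let m := numberA (mirror_allA ds)
      if m < num + 1 then res1.insert m true else res1
    else res

def confusing_naive (num : Int) : List Int :=
  let res := (PySem.List.pyRange 0 (num+1) 1).foldl (stepA num) PySem.Dict.empty
  PySem.List.sorted res.keys (fun x => x) false

-- ===== PORT B =====
def stepB (num : Int) (st : List Int × List Int) (_ : Int) : List Int × List Int :=
  (st.1 ++ st.2,
   st.2.flatMap (fun v =>
     (([0,1,6,8,9] : List Int).filter (fun d => 10*v+d ≤ num)).map (fun d => 10*v+d)))

def confusing_naive_alt (num : Int) : List Int :=
  let res0 : List Int := if num ≥ 0 then [0] else []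
  let frontier0 := ([1,6,8,9] : List Int).filter (fun d => d ≤ num)
  ((PySem.List.pyRange 0 (PySem.Str.len (PySem.Int.toStr num)) 1).foldl
    (stepB num) (res0, frontier0)).1

-- ===== PRECONDITION & SPEC =====
def Spec_confusing_naive (num : Int) (out : List Int) : Prop := out = confusing_naive_alt num
instance (num : Int) (out : List Int) : Decidable (Spec_confusing_naive num out) := by unfold Spec_confusing_naive; infer_instance

-- ===== CLAIM (what is proved, stated in full; the proofs are below) =====
def Claim_equal_confusing_naive : Prop := ∀ (num : Int), Dom_confusing_naive num → Spec_confusing_naive num (confusing_naive num)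

-- ===== LEMMAS AND PROOFS =====

-- a digit that survives mirroring: {0,1,6,8,9}
def goodDigit (d : Int) : Bool := d == 0 || d == 1 || d == 6 || d == 8 || d == 9

def good (n : Int) : Bool :=
  if n < 10 then goodDigit n
  else goodDigit (n % 10) && good (n / 10)
termination_by n.toNat
decreasing_by omega

-- the value both programs compute: the mirrorable numbers in [0, num], increasing
def target (num : Int) : List Int := (PySem.List.pyRange 0 (num+1) 1).filter good

theorem good_lt10 (n : Int) (h : n < 10) : good n = goodDigit n := by
  rw [good]; simp [h]

theorem good_ge10 (n : Int) (h : 10 ≤ n) : good n = (goodDigit (n % 10) && good (n / 10)) := by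
  rw [good]; simp [show ¬ n < 10 by omega]

theorem good_tens (v d : Int) (hv : 0 ≤ v) (hd0 : 0 ≤ d) (hd : d < 10) :
    good (10*v + d) = (goodDigit d && good v) := by
  rcases eq_or_lt_of_le hv with hv0 | hv1
  · rw [← hv0]
    simp [good_lt10 d hd, good_lt10 (10 * 0 + d) (by omega), good_lt10 0 (by omega), goodDigit]
  · rw [good_ge10 _ (by omega)]
    have h1 : (10*v + d) % 10 = d := by omega
    have h2 : (10*v + d) / 10 = v := by omega
    rw [h1, h2]

theorem MIRROR_DIGITS_mk : MIRROR_DIGITS = PySem.Dict.mk [(0,0),(1,1),(6,9),(8,8),(9,6)] := by decide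

theorem mirroredA_eq (d : Int) : mirroredA d =
    if d = 0 then 0 else if d = 1 then 1 else if d = 6 then 9
    else if d = 8 then 8 else if d = 9 then 6 else -1 := by
  by_cases h0 : d = 0
  · subst h0; decide
  by_cases h1 : d = 1
  · subst h1; decide
  by_cases h6 : d = 6
  · subst h6; decide
  by_cases h8 : d = 8
  · subst h8; decide
  by_cases h9 : d = 9
  · subst h9; decide
  rw [mirroredA, MIRROR_DIGITS_mk, PySem.Dict.getD_eq_get?_getD]
  simp only [PySem.Dict.get?_mk_cons]
  simp [beq_iff_eq, show (0:Int) ≠ d from fun h => h0 h.symm,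
        show (1:Int) ≠ d from fun h => h1 h.symm, show (6:Int) ≠ d from fun h => h6 h.symm,
        show (8:Int) ≠ d from fun h => h8 h.symm, show (9:Int) ≠ d from fun h => h9 h.symm,
        h0, h1, h6, h8, h9, PySem.Dict.get?]

theorem mirrored_ne_neg_one (d : Int) : (!(mirroredA d == -1)) = goodDigit d := by
  rw [mirroredA_eq]
  simp [goodDigit]
  split_ifs <;> simp_all

theorem truncdiv_ten (n : Int) (h : 0 ≤ n) : PySem.Int.truncdiv n 10 = n / 10 := by
  simp only [PySem.Int.truncdiv]
  rw [Int.tdiv_eq_ediv_of_nonneg (by omega)]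

theorem mod_ten (n : Int) : PySem.Int.mod n 10 = n % 10 :=
  PySem.Int.mod_eq_emod_of_pos (by omega)

theorem digitsLoop_append (n : Int) (ds : List Int) :
    digitsLoop n ds = ds ++ digitsLoop n [] := by
  by_cases h : 1 ≤ n
  · rw [digitsLoop, if_pos h]
    conv_rhs => rw [digitsLoop, if_pos h]
    rw [digitsLoop_append _ (ds ++ _), digitsLoop_append _ ([] ++ _)]
    simp
  · rw [digitsLoop, if_neg h, digitsLoop, if_neg h]
    simp
termination_by n.toNat
decreasing_by
  all_goals
    simp only [PySem.Int.truncdiv]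
    have h2 : n.tdiv 10 < n := by
      rw [Int.tdiv_eq_ediv_of_nonneg (by omega)]
      omega
    omega

theorem digitsA_lt10 (n : Int) (h0 : 0 ≤ n) (h : n < 10) : digitsA n = [n] := by
  rcases eq_or_lt_of_le h0 with h0' | h0'
  · rw [← h0']; decide
  · rw [digitsA, if_neg (by simp; omega)]
    rw [digitsLoop, if_pos (by omega)]
    rw [digitsLoop, if_neg (by rw [truncdiv_ten n h0]; omega)]
    rw [mod_ten]
    simp
    omega

theorem digitsA_ge10 (n : Int) (h : 10 ≤ n) : digitsA n = digitsA (n / 10) ++ [n % 10] := by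
  rw [digitsA, if_neg (by simp; omega)]
  rw [digitsLoop, if_pos (by omega), truncdiv_ten n (by omega), mod_ten]
  rw [digitsLoop_append]
  rw [digitsA, if_neg (by simp; omega)]
  simp

-- value of a little-endian digit list
def valLow : List Int → Int
  | [] => 0
  | d :: l => d + 10 * valLow l

theorem numAux (l : List Int) (a t : Int) (ht : 0 ≤ t) :
    l.foldl (fun (st : Int × Int) d => (st.1 + d * 10 ^ st.2.toNat, st.2 + 1)) (a, t) =
      (a + valLow l * 10 ^ t.toNat, t + l.length) := by
  induction l generalizing a t with
  | nil => simp [valLow]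
  | cons d l ih =>
    simp only [List.foldl_cons, valLow]
    rw [ih _ _ (by omega)]
    have h1 : (t + 1).toNat = t.toNat + 1 := by omega
    rw [h1, pow_succ]
    simp only [Prod.mk.injEq]
    constructor
    · ring
    · simp
      omega

theorem numberA_eq (ds : List Int) : numberA ds = valLow ds.reverse := by
  rw [numberA, numAux _ _ _ (by omega)]
  simp

theorem numberA_append (ds : List Int) (d : Int) :
    numberA (ds ++ [d]) = 10 * numberA ds + d := by
  rw [numberA_eq, numberA_eq]
  simp [valLow]
  ring

theorem numberA_single (d : Int) : numberA [d] = d := by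
  rw [numberA_eq]
  simp [valLow]

theorem is_mirrored_eq_all_good (ds : List Int) : is_mirrored_allA ds = ds.all goodDigit := by
  simp only [is_mirrored_allA, mirrored_ne_neg_one]

theorem mirror_all_eq_map (ds : List Int) (h : ds.all goodDigit = true) :
    mirror_allA ds = ds.map mirroredA := by
  rw [mirror_allA, PySem.List.foldl_append_ite (p := fun d => mirroredA d ≥ 0) (f := mirroredA)]
  rw [List.filter_eq_self.mpr]
  · simp
  · intro d hd
    have hg : goodDigit d = true := by
      simp only [List.all_eq_true] at h
      exact h d hd
    rw [mirroredA_eq]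
    simp only [goodDigit] at hg
    simp at hg
    rcases hg with (((h|h)|h)|h)|h <;> subst h <;> decide

theorem goodDigit_bounds (d : Int) (h : goodDigit d = true) :
    0 ≤ d ∧ d < 10 ∧ 0 ≤ mirroredA d ∧ mirroredA d < 10 ∧ goodDigit (mirroredA d) = true := by
  simp only [goodDigit] at h
  simp at h
  rcases h with (((h|h)|h)|h)|h <;> subst h <;> decide

theorem all_digits_eq_good (n : Int) (h : 0 ≤ n) :
    (digitsA n).all goodDigit = good n := by
  by_cases h10 : n < 10
  · rw [digitsA_lt10 n h h10, good_lt10 n h10]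
    simp
  · rw [digitsA_ge10 n (by omega), good_ge10 n (by omega)]
    rw [List.all_append]
    rw [all_digits_eq_good (n / 10) (by omega)]
    simp [Bool.and_comm]
termination_by n.toNat
decreasing_by omega

theorem mirror_good (n : Int) (h0 : 0 ≤ n) (hg : good n = true) :
    0 ≤ numberA (mirror_allA (digitsA n)) ∧ good (numberA (mirror_allA (digitsA n))) = true := by
  by_cases h10 : n < 10
  · rw [digitsA_lt10 n h0 h10]
    have hgd : goodDigit n = true := by rw [good_lt10 n h10] at hg; exact hg
    obtain ⟨_, _, hm0, hm10, hmg⟩ := goodDigit_bounds n hgd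
    rw [mirror_all_eq_map _ (by simp [hgd])]
    simp only [List.map]
    rw [numberA_single]
    exact ⟨hm0, by rw [good_lt10 _ hm10]; exact hmg⟩
  · have hrec := digitsA_ge10 n (by omega)
    have hall : (digitsA n).all goodDigit = true := by rw [all_digits_eq_good n h0]; exact hg
    have hall' : (digitsA (n / 10)).all goodDigit = true := by
      rw [hrec] at hall; simp [List.all_append] at hall
      simp [List.all_eq_true]
      exact fun d hd => hall.1 d hd
    have hgd : goodDigit (n % 10) = true := by
      rw [hrec] at hall; simp [List.all_append] at hall
      exact hall.2
    have hg' : good (n / 10) = true := by rw [← all_digits_eq_good _ (by omega)]; exact hall'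
    obtain ⟨ih0, ihg⟩ := mirror_good (n / 10) (by omega) hg'
    rw [hrec, mirror_all_eq_map _ (by rw [hrec] at hall; exact hall)]
    rw [List.map_append]
    simp only [List.map]
    rw [← mirror_all_eq_map _ hall', numberA_append]
    obtain ⟨_, _, hm0, hm10, hmg⟩ := goodDigit_bounds (n % 10) hgd
    constructor
    · omega
    · have := good_tens (numberA (mirror_allA (digitsA (n / 10)))) (mirroredA (n % 10)) ih0 hm0 hm10
      rw [show 10 * numberA (mirror_allA (digitsA (n / 10))) + mirroredA (n % 10) =
            10 * numberA (mirror_allA (digitsA (n / 10))) + mirroredA (n % 10) from rfl] at this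
      rw [this, hmg, ihg]
      rfl
termination_by n.toNat
decreasing_by omega

theorem stepA_keys (num : Int) (res : PySem.Dict Int Bool) (n : Int)
    (hn0 : 0 ≤ n) (hn : n ≤ num) :
    (∀ k, k ∈ res.keys → k ∈ (stepA num res n).keys) ∧
    (∀ k, k ∈ (stepA num res n).keys → k ∈ res.keys ∨ (0 ≤ k ∧ k ≤ num ∧ good k = true)) ∧
    (good n = true → n ∈ (stepA num res n).keys) ∧
    (res.keys.Nodup → (stepA num res n).keys.Nodup) := by
  rw [stepA]
  by_cases hc : res.contains n
  · rw [if_pos hc]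
    exact ⟨fun k hk => hk, fun k hk => Or.inl hk,
      fun _ => (PySem.Dict.contains_iff_mem_keys res n).mp hc, fun h => h⟩
  · rw [if_neg hc]
    simp only
    by_cases hm : is_mirrored_allA (digitsA n)
    · rw [if_pos hm]
      have hgn : good n = true := by
        rw [is_mirrored_eq_all_good, all_digits_eq_good n hn0] at hm
        exact hm
      have hmg := mirror_good n hn0 hgn
      by_cases hlt : numberA (mirror_allA (digitsA n)) < num + 1
      · rw [if_pos hlt]
        refine ⟨?_, ?_, ?_, ?_⟩
        · intro k hk
          rw [PySem.Dict.mem_keys_insert, PySem.Dict.mem_keys_insert]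
          tauto
        · intro k hk
          rw [PySem.Dict.mem_keys_insert, PySem.Dict.mem_keys_insert] at hk
          rcases hk with hk | hk | hk
          · right; subst hk; exact ⟨hmg.1, by omega, hmg.2⟩
          · right; subst hk; exact ⟨hn0, hn, hgn⟩
          · left; exact hk
        · intro _
          rw [PySem.Dict.mem_keys_insert, PySem.Dict.mem_keys_insert]
          tauto
        · intro h
          exact PySem.Dict.nodup_keys_insert _ _ _ (PySem.Dict.nodup_keys_insert _ _ _ h)
      · rw [if_neg hlt]
        refine ⟨?_, ?_, ?_, ?_⟩
        · intro k hk
          rw [PySem.Dict.mem_keys_insert]; tauto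
        · intro k hk
          rw [PySem.Dict.mem_keys_insert] at hk
          rcases hk with hk | hk
          · right; subst hk; exact ⟨hn0, hn, hgn⟩
          · left; exact hk
        · intro _
          rw [PySem.Dict.mem_keys_insert]; tauto
        · intro h
          exact PySem.Dict.nodup_keys_insert _ _ _ h
    · rw [if_neg hm]
      have hgn : good n = false := by
        rw [is_mirrored_eq_all_good, all_digits_eq_good n hn0] at hm
        simpa using hm
      refine ⟨fun k hk => hk, fun k hk => Or.inl hk, ?_, fun h => h⟩
      intro h
      rw [h] at hgn
      cases hgn

theorem foldA_keys (num : Int) : ∀ (i : Int) (res : PySem.Dict Int Bool),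
    0 ≤ i →
    (∀ k, k ∈ res.keys → 0 ≤ k ∧ k ≤ num ∧ good k = true) →
    res.keys.Nodup →
    (∀ k, k ∈ ((PySem.List.pyRange i (num+1) 1).foldl (stepA num) res).keys →
      (0 ≤ k ∧ k ≤ num ∧ good k = true)) ∧
    (∀ k, (k ∈ res.keys ∨ (i ≤ k ∧ k ≤ num ∧ good k = true)) →
      k ∈ ((PySem.List.pyRange i (num+1) 1).foldl (stepA num) res).keys) ∧
    ((PySem.List.pyRange i (num+1) 1).foldl (stepA num) res).keys.Nodup := by
  intro i res hi hres hnd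
  by_cases hend : num + 1 ≤ i
  · rw [PySem.List.pyRange_one_eq_nil hend]
    simp only [List.foldl_nil]
    refine ⟨hres, ?_, hnd⟩
    intro k h
    rcases h with h | h
    · exact h
    · omega
  · rw [PySem.List.pyRange_one_cons (by omega)]
    simp only [List.foldl_cons]
    obtain ⟨hmono, hsub, hgood, hnd'⟩ := stepA_keys num res i hi (by omega)
    have hres' : ∀ k, k ∈ (stepA num res i).keys → 0 ≤ k ∧ k ≤ num ∧ good k = true := by
      intro k hk
      rcases hsub k hk with h | h
      · exact hres k h
      · exact h
    have ih := foldA_keys num (i+1) (stepA num res i) (by omega) hres' (hnd' hnd)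
    refine ⟨ih.1, ?_, ih.2.2⟩
    intro k h
    rcases h with h | h
    · exact ih.2.1 k (Or.inl (hmono k h))
    · by_cases hki : i + 1 ≤ k
      · exact ih.2.1 k (Or.inr ⟨hki, h.2⟩)
      · have hk : k = i := by omega
        subst hk
        exact ih.2.1 k (Or.inl (hgood h.2.2))
termination_by i => (num + 1 - i).toNat
decreasing_by omega

theorem target_pairwise (num : Int) : (target num).Pairwise (· < ·) :=
  (PySem.List.pairwise_lt_pyRange_one 0 (num+1)).sublist List.filter_sublist

theorem target_nodup (num : Int) : (target num).Nodup :=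
  (target_pairwise num).imp (fun h => ne_of_lt h)

theorem mem_target (num k : Int) : k ∈ target num ↔ (0 ≤ k ∧ k ≤ num ∧ good k = true) := by
  rw [target, List.mem_filter, PySem.List.mem_pyRange_one]
  constructor
  · rintro ⟨⟨a, b⟩, c⟩
    exact ⟨a, by omega, c⟩
  · rintro ⟨a, b, c⟩
    exact ⟨⟨a, by omega⟩, c⟩

theorem A_eq_target (num : Int) : confusing_naive num = target num := by
  rw [confusing_naive]
  obtain ⟨h1, h2, h3⟩ := foldA_keys num 0 PySem.Dict.empty (le_refl 0)
    (by intro k hk; rw [PySem.Dict.keys_empty] at hk; cases hk)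
    (by rw [PySem.Dict.keys_empty]; exact List.nodup_nil)
  apply PySem.List.sorted_eq_of_perm_of_pairwise_lt
  · rw [List.perm_ext_iff_of_nodup (target_nodup num) h3]
    intro k
    rw [mem_target]
    constructor
    · intro h
      exact h2 k (Or.inr h)
    · intro h
      exact h1 k h
  · exact target_pairwise num

def pgood (num w : Int) : Bool := good w && decide (w ≤ num)

def Rk (num : Int) (k : Nat) : List Int :=
  (PySem.List.pyRange 0 (10^k) 1).filter (pgood num)

def Fk (num : Int) (k : Nat) : List Int :=
  (PySem.List.pyRange (10^k) (10^(k+1)) 1).filter (pgood num)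

theorem blocks (a b : Int) : ∀ (ha : 0 ≤ a),
    (PySem.List.pyRange a b 1).flatMap (fun v => PySem.List.pyRange (10*v) (10*v+10) 1) =
    PySem.List.pyRange (10*a) (10*b) 1 := by
  intro ha
  by_cases h : b ≤ a
  · rw [PySem.List.pyRange_one_eq_nil h, PySem.List.pyRange_one_eq_nil (by omega)]
    rfl
  · rw [PySem.List.pyRange_one_cons (by omega), List.flatMap_cons,
        blocks (a+1) b (by omega),
        PySem.List.pyRange_one_append (10*a) (10*a+10) (10*b) (by omega) (by omega)]
    simp [mul_add]
termination_by (b - a).toNat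
decreasing_by omega

theorem flatMap_filter_of_nil {q : Int → Bool} {g : Int → List Int} (l : List Int)
    (h : ∀ v ∈ l, q v = false → g v = []) :
    (l.filter q).flatMap g = l.flatMap g := by
  induction l with
  | nil => rfl
  | cons x l ih =>
    rw [List.filter_cons]
    by_cases hx : q x
    · rw [if_pos (by simp [hx]), List.flatMap_cons, List.flatMap_cons,
          ih (fun v hv => h v (List.mem_cons_of_mem x hv))]
    · rw [if_neg (by simp [hx]), List.flatMap_cons,
          h x (List.mem_cons_self) (by simpa using hx),
          ih (fun v hv => h v (List.mem_cons_of_mem x hv))]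
      rfl

theorem inner_bad (num v : Int) (hv : 1 ≤ v) (hbad : pgood num v = false) :
    (PySem.List.pyRange (10*v) (10*v+10) 1).filter (pgood num) = [] := by
  rw [List.filter_eq_nil_iff]
  intro w hw
  rw [PySem.List.mem_pyRange_one] at hw
  have hg : good w = (goodDigit (w % 10) && good (w / 10)) := good_ge10 w (by omega)
  have h1 : w / 10 = v := by omega
  rw [pgood, hg, h1]
  rw [pgood] at hbad
  simp only [Bool.and_eq_false_iff] at hbad
  rcases hbad with hb | hb
  · simp [hb]
  · simp at hb ⊢
    intro _ _
    omega

theorem inner_good (num v : Int) (hv : 1 ≤ v) (hgv : good v = true) :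
    (PySem.List.pyRange (10*v) (10*v+10) 1).filter (pgood num) =
    (([0,1,6,8,9] : List Int).filter (fun d => 10*v+d ≤ num)).map (fun d => 10*v+d) := by
  have hexp : PySem.List.pyRange (10*v) (10*v+10) 1 =
      [10*v+0, 10*v+1, 10*v+2, 10*v+3, 10*v+4, 10*v+5, 10*v+6, 10*v+7, 10*v+8, 10*v+9] := by
    rw [PySem.List.pyRange_one]
    norm_num
    rw [show (10:Int).toNat = 10 from rfl]
    simp [List.range_succ]
  rw [hexp]
  have h : ∀ d : Int, 0 ≤ d → d < 10 →
      pgood num (10*v+d) = (goodDigit d && decide (10*v+d ≤ num)) := by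
    intro d h0 h1
    rw [pgood, good_tens v d (by omega) h0 h1, hgv]
    simp [Bool.and_assoc]
  simp only [List.filter_cons, List.filter_nil, List.map_cons, List.map_nil,
    h 0 (by omega) (by omega), h 1 (by omega) (by omega), h 2 (by omega) (by omega), h 3 (by omega) (by omega),
    h 4 (by omega) (by omega), h 5 (by omega) (by omega), h 6 (by omega) (by omega),
    h 7 (by omega) (by omega), h 8 (by omega) (by omega), h 9 (by omega) (by omega),
    (show goodDigit 1 = true from rfl), (show goodDigit 2 = false from rfl),
    (show goodDigit 3 = false from rfl), (show goodDigit 4 = false from rfl),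
    (show goodDigit 5 = false from rfl), (show goodDigit 6 = true from rfl),
    (show goodDigit 7 = false from rfl), (show goodDigit 8 = true from rfl),
    (show goodDigit 9 = true from rfl),
    (show goodDigit 0 = true from rfl), Bool.true_and, Bool.false_and]
  simp only [decide_eq_true_eq, if_false_right, Bool.false_eq_true, if_false]
  split_ifs <;> first | rfl | omega

theorem pow_ten_pos (k : Nat) : (0:Int) < 10^k := pow_pos (by omega) k

theorem pow_ten_mono (k : Nat) : (10:Int)^k ≤ 10^(k+1) := by
  have := pow_ten_pos k
  calc (10:Int)^k ≤ 10 * 10^k := by omega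
  _ = 10^(k+1) := by ring

theorem frontier_step (num : Int) (k : Nat) :
    (Fk num k).flatMap (fun v =>
      (([0,1,6,8,9] : List Int).filter (fun d => 10*v+d ≤ num)).map (fun d => 10*v+d)) =
    Fk num (k+1) := by
  have hpos := pow_ten_pos k
  have hblocks := blocks (10^k) (10^(k+1)) (by omega)
  rw [show (10:Int) * 10^k = 10^(k+1) by ring, show (10:Int) * 10^(k+1) = 10^(k+1+1) by ring] at hblocks
  rw [Fk, Fk, ← hblocks, List.filter_flatMap]
  rw [← flatMap_filter_of_nil (q := pgood num)
        (g := fun v => (PySem.List.pyRange (10*v) (10*v+10) 1).filter (pgood num))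
        _ (fun v hv hbad => by
          rw [PySem.List.mem_pyRange_one] at hv
          exact inner_bad num v (by omega) hbad)]
  apply List.flatMap_congr
  intro v hv
  rw [List.mem_filter, PySem.List.mem_pyRange_one] at hv
  have hgv : good v = true := by
    have := hv.2
    rw [pgood] at this
    exact (Bool.and_eq_true_iff.mp this).1
  exact (inner_good num v (by omega) hgv).symm

theorem res_step (num : Int) (k : Nat) : Rk num k ++ Fk num k = Rk num (k+1) := by
  have hpos := pow_ten_pos k
  rw [Rk, Fk, Rk, ← List.filter_append,
      ← PySem.List.pyRange_one_append 0 (10^k) (10^(k+1)) (by omega) (pow_ten_mono k)]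

theorem stepB_eq (num : Int) (k : Nat) (x : Int) :
    stepB num (Rk num k, Fk num k) x = (Rk num (k+1), Fk num (k+1)) := by
  rw [stepB]
  simp only
  rw [res_step, frontier_step]

theorem foldB (num : Int) (l : List Int) : ∀ (k : Nat),
    l.foldl (stepB num) (Rk num k, Fk num k) = (Rk num (k + l.length), Fk num (k + l.length)) := by
  induction l with
  | nil => intro k; simp
  | cons x l ih =>
    intro k
    rw [List.foldl_cons, stepB_eq, ih (k+1)]
    simp only [List.length_cons]
    rw [show k + 1 + l.length = k + (l.length + 1) by omega]

theorem R0_eq (num : Int) : Rk num 0 = (if num ≥ 0 then [0] else [] : List Int) := by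
  rw [Rk]
  rw [show ((10:Int)^(0:Nat)) = 1 by norm_num, show PySem.List.pyRange 0 1 1 = [0] by decide]
  rw [List.filter_singleton]
  have hp : pgood num 0 = decide (0 ≤ num) := by
    rw [pgood, good_lt10 0 (by omega)]
    simp [goodDigit]
  rw [hp]
  by_cases h : 0 ≤ num
  · simp [h]
  · simp [h]

theorem F0_eq (num : Int) : Fk num 0 = ([1,6,8,9] : List Int).filter (fun d => d ≤ num) := by
  rw [Fk]
  rw [show ((10:Int)^(0:Nat)) = 1 by norm_num, show ((10:Int)^(0+1:Nat)) = 10 by norm_num]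
  rw [show PySem.List.pyRange 1 10 1 = [1,2,3,4,5,6,7,8,9] by decide]
  have g : ∀ d : Int, 0 ≤ d → d < 10 → good d = goodDigit d := fun d _ h => good_lt10 d h
  simp only [List.filter_cons, List.filter_nil, pgood,
    g 1 (by omega) (by omega), g 2 (by omega) (by omega), g 3 (by omega) (by omega),
    g 4 (by omega) (by omega), g 5 (by omega) (by omega), g 6 (by omega) (by omega),
    g 7 (by omega) (by omega), g 8 (by omega) (by omega), g 9 (by omega) (by omega),
    (show goodDigit 1 = true from rfl), (show goodDigit 2 = false from rfl),
    (show goodDigit 3 = false from rfl), (show goodDigit 4 = false from rfl),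
    (show goodDigit 5 = false from rfl), (show goodDigit 6 = true from rfl),
    (show goodDigit 7 = false from rfl), (show goodDigit 8 = true from rfl),
    (show goodDigit 9 = true from rfl), Bool.true_and, Bool.false_and]
  simp

theorem R_final (num : Int) (K : Nat) (h0 : 0 ≤ num) (hK : num < 10^K) :
    Rk num K = target num := by
  have hpos := pow_ten_pos K
  rw [Rk, target,
      PySem.List.pyRange_one_append 0 (num+1) (10^K) (by omega) (by omega),
      List.filter_append]
  rw [show (PySem.List.pyRange (num+1) (10^K) 1).filter (pgood num) = [] from by
    rw [List.filter_eq_nil_iff]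
    intro w hw
    rw [PySem.List.mem_pyRange_one] at hw
    rw [pgood]
    simp
    intro _
    omega]
  rw [List.append_nil]
  apply List.filter_congr
  intro w hw
  rw [PySem.List.mem_pyRange_one] at hw
  rw [pgood]
  simp
  omega

theorem num_lt_pow_len (num : Int) (h0 : 0 ≤ num) :
    num < 10 ^ ((PySem.Str.len (PySem.Int.toStr num)).toNat) := by
  have e : PySem.Str.len (PySem.Int.toStr num) = ((PySem.Int.toChars num).length : Int) := by
    rw [PySem.Str.len_eq, PySem.Int.toList_toStr]
  rw [e]
  have e2 : PySem.Int.toChars num = Nat.toDigits 10 num.toNat := by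
    rw [PySem.Int.toChars]
    rw [if_neg (by omega)]
  rw [e2]
  have hb := (Nat.length_toDigits_le_iff (b := 10) (n := num.toNat)
    (k := (Nat.toDigits 10 num.toNat).length) (by omega) Nat.length_toDigits_pos).mp le_rfl
  have : ((Nat.toDigits 10 num.toNat).length : Int).toNat = (Nat.toDigits 10 num.toNat).length := by
    omega
  rw [this]
  have : num = (num.toNat : Int) := by omega
  rw [this]
  exact_mod_cast hb

theorem foldB_nil_frontier (num : Int) (l : List Int) (r : List Int) :
    l.foldl (stepB num) (r, []) = (r, []) := by
  induction l generalizing r with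
  | nil => rfl
  | cons x l ih =>
    rw [List.foldl_cons, stepB]
    simp only [List.append_nil, List.flatMap_nil]
    exact ih r

theorem B_eq_target (num : Int) : confusing_naive_alt num = target num := by
  rw [confusing_naive_alt]
  by_cases h0 : 0 ≤ num
  · rw [show (if num ≥ 0 then ([0]:List Int) else []) = Rk num 0 from (R0_eq num).symm,
        show ([1,6,8,9] : List Int).filter (fun d => decide (d ≤ num)) = Fk num 0 from (F0_eq num).symm]
    rw [foldB]
    apply R_final num _ h0
    have hlen : (PySem.List.pyRange 0 (PySem.Str.len (PySem.Int.toStr num)) 1).length =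
        (PySem.Str.len (PySem.Int.toStr num)).toNat := by
      rw [PySem.List.length_pyRange_one]
      norm_num
    rw [hlen]
    simpa using num_lt_pow_len num h0
  · rw [show (if num ≥ 0 then ([0]:List Int) else []) = [] from by rw [if_neg (by omega)],
        show ([1,6,8,9] : List Int).filter (fun d => decide (d ≤ num)) = [] from
          List.filter_eq_nil_iff.mpr (fun d hd => by fin_cases hd <;> simp <;> omega)]
    rw [foldB_nil_frontier]
    rw [target, PySem.List.pyRange_one_eq_nil (by omega)]
    rfl

-- ===== VERDICT (by name: the statement is the Claim_ definition above) =====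
theorem confusing_naive_spec : Claim_equal_confusing_naive := by
  intro num _
  unfold Spec_confusing_naive
  rw [A_eq_target, B_eq_target]
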